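-- pv_equiv track=rewrite | github.com/wiz21b/badapple | utils.py | pack_line_one_pixel_stop
-- ===== SOURCE A (Python) =====
-- def pack_line_one_pixel_stop( data, i, scan_values, stop_values, max_i, strip_max_len):
--     """ Somehow, picking an additional, different, pixel after a long run
--     is really efficient (ie a 8% increase in compression).
--
--     Picking 1 more is 10% more efficient.
--     Picking 2 more is 30% less efficient.
--     Picking n more is totally not efficient (like 100% less efficient)
--     """
--     cnt = 0
--     stripe = []
--     while i < len(data) and data[i] == scan_values and (cnt < strip_max_len) and i < max_i: # and (data[i] in scan_values)
--         stripe.append(data[i])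
--         i += 1
--         cnt += 1
--
--
--     stop_value_cnt = 0
--     while i < len(data) and (cnt < strip_max_len) and i < max_i: # and (data[i] in scan_values)
--         stripe.append(data[i])
--         i += 1
--         cnt += 1
--         stop_value_cnt += 1
--         if stop_value_cnt == 1:
--             break
--
--     return stripe, i
-- ===== SOURCE B (Python) =====
-- def pack_line_one_pixel_stop(data, i, scan_values, stop_values, max_i, strip_max_len):
--     # find-the-boundary formulation: locate the first mismatch, compute the final
--     # index j by arithmetic, then materialize the stripe in one comprehension
--     limit = min(len(data), max_i, i + strip_max_len)
--     end = next((k for k in range(i, limit) if data[k] != scan_values), limit)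
--     j = max(i, min(end + 1, limit))
--     return [data[k] for k in range(i, j)], j
-- ===== Notes on version B (the rewrite author's own statement) =====
-- stated objective: alternative
-- what changed: A's stateful accumulation (two sequential while-loops with cnt/stop_value_cnt counters and a break, appending as it scans) is replaced by a search-then-build formulation: find the first mismatching index, compute the final index j in closed form from it, and materialize the stripe afterwards in one comprehension over range(i, j).
import Mathlib
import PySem

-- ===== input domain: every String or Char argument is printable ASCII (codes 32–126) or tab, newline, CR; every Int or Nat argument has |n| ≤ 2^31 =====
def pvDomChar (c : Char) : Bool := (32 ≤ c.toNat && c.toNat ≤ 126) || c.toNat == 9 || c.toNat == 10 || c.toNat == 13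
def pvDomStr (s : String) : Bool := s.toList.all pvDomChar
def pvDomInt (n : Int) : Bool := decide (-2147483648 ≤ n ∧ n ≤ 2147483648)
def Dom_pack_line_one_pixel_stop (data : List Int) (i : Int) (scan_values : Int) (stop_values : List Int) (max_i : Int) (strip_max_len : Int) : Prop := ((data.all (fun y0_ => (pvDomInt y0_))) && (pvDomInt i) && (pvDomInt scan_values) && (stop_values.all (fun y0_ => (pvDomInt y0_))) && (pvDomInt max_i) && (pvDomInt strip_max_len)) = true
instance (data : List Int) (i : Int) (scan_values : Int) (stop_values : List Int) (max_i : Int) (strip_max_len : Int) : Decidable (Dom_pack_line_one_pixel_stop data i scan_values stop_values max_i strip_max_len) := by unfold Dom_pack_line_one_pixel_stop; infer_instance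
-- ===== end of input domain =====

-- B replaces A's two stateful accumulation loops (cnt/stop_value_cnt counters, break) by a
-- search-then-build formulation: find the first mismatching index, compute the final index j
-- by arithmetic, then materialize the stripe in one comprehension (objective: alternative).

-- ===== PORT A =====
-- first while loop of A; state (stripe, i, cnt); fuel decreases each iteration
def pvALoop1 (data : List Int) (scan_values max_i strip_max_len : Int) :
    Nat → List Int → Int → Int → List Int × Int × Int
  | 0, stripe, i, cnt => (stripe, i, cnt)
  | fuel+1, stripe, i, cnt =>
      if i < (data.length : Int) ∧ PySem.List.pyGet? data i = some scan_values ∧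
         cnt < strip_max_len ∧ i < max_i then
        pvALoop1 data scan_values max_i strip_max_len fuel
          (stripe ++ [(PySem.List.pyGet? data i).getD 0]) (i + 1) (cnt + 1)
      else (stripe, i, cnt)

-- second while loop of A, with stop_value_cnt and the break after one iteration
def pvALoop2 (data : List Int) (max_i strip_max_len : Int) :
    Nat → List Int → Int → Int → Int → List Int × Int
  | 0, stripe, i, _, _ => (stripe, i)
  | fuel+1, stripe, i, cnt, stop_value_cnt =>
      if i < (data.length : Int) ∧ cnt < strip_max_len ∧ i < max_i then
        if stop_value_cnt + 1 = 1 then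
          (stripe ++ [(PySem.List.pyGet? data i).getD 0], i + 1)   -- break
        else
          pvALoop2 data max_i strip_max_len fuel
            (stripe ++ [(PySem.List.pyGet? data i).getD 0], i + 1, cnt + 1, stop_value_cnt + 1).1
            (i + 1) (cnt + 1) (stop_value_cnt + 1)
      else (stripe, i)

def pack_line_one_pixel_stop (data : List Int) (i : Int) (scan_values : Int) (stop_values : List Int) (max_i : Int) (strip_max_len : Int) : List Int × Int :=
  let r := pvALoop1 data scan_values max_i strip_max_len ((data.length : Int) - i).toNat [] i 0
  pvALoop2 data max_i strip_max_len ((data.length : Int) - r.2.1).toNat r.1 r.2.1 r.2.2 0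

-- ===== PORT B =====
-- Source B's generator predicate: data[k] != scan_values
def pvMismatch (data : List Int) (scan_values : Int) (k : Int) : Bool :=
  !(PySem.List.pyGet? data k == some scan_values)

-- Source B's element read data[k] (always in range under Pre_)
def pvPix (data : List Int) (k : Int) : Int := (PySem.List.pyGet? data k).getD 0

def pack_line_one_pixel_stop_alt (data : List Int) (i : Int) (scan_values : Int) (stop_values : List Int) (max_i : Int) (strip_max_len : Int) : List Int × Int :=
  let limit := min (min ((data.length : Int)) max_i) (i + strip_max_len)
  let e := ((PySem.List.pyRange i limit 1).find? (pvMismatch data scan_values)).getD limit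
  let j := max i (min (e + 1) limit)
  ((PySem.List.pyRange i j 1).map (pvPix data), j)

-- ===== PRECONDITION & SPEC =====
-- A raises IndexError (data[i] with i below -len(data) in the first guard) exactly when
-- i < -len(data); Pre_ excludes exactly those inputs.
def Pre_pack_line_one_pixel_stop (data : List Int) (i : Int) (scan_values : Int) (stop_values : List Int) (max_i : Int) (strip_max_len : Int) : Prop :=
  -(data.length : Int) ≤ i
instance (data : List Int) (i : Int) (scan_values : Int) (stop_values : List Int) (max_i : Int) (strip_max_len : Int) : Decidable (Pre_pack_line_one_pixel_stop data i scan_values stop_values max_i strip_max_len) := by unfold Pre_pack_line_one_pixel_stop; infer_instance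

def pvWitness_pack_line_one_pixel_stop : List Int × Int × Int × List Int × Int × Int :=
  ([1, 1, 2, 1], 0, 1, [], 10, 5)

def Spec_pack_line_one_pixel_stop (data : List Int) (i : Int) (scan_values : Int) (stop_values : List Int) (max_i : Int) (strip_max_len : Int) (out : List Int × Int) : Prop := out = pack_line_one_pixel_stop_alt data i scan_values stop_values max_i strip_max_len
instance (data : List Int) (i : Int) (scan_values : Int) (stop_values : List Int) (max_i : Int) (strip_max_len : Int) (out : List Int × Int) : Decidable (Spec_pack_line_one_pixel_stop data i scan_values stop_values max_i strip_max_len out) := by unfold Spec_pack_line_one_pixel_stop; infer_instance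

-- ===== CLAIM (what is proved, stated in full; the proofs are below) =====
def Claim_equal_pack_line_one_pixel_stop : Prop := ∀ (data : List Int) (i : Int) (scan_values : Int) (stop_values : List Int) (max_i : Int) (strip_max_len : Int), Dom_pack_line_one_pixel_stop data i scan_values stop_values max_i strip_max_len → Pre_pack_line_one_pixel_stop data i scan_values stop_values max_i strip_max_len → Spec_pack_line_one_pixel_stop data i scan_values stop_values max_i strip_max_len (pack_line_one_pixel_stop data i scan_values stop_values max_i strip_max_len)

-- ===== LEMMAS AND PROOFS =====

-- the first-mismatch index, the quantity Source B's `next(...)` computes from a start index a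
def pvEnd (data : List Int) (scan_values limit a : Int) : Int :=
  ((PySem.List.pyRange a limit 1).find? (pvMismatch data scan_values)).getD limit

theorem pvEnd_bounds (data : List Int) (scan_values limit a : Int) (h : a ≤ limit) :
    a ≤ pvEnd data scan_values limit a ∧ pvEnd data scan_values limit a ≤ limit := by
  unfold pvEnd
  cases hf : (PySem.List.pyRange a limit 1).find? (pvMismatch data scan_values) with
  | none => simp only [Option.getD_none]; exact ⟨h, le_rfl⟩
  | some k =>
      have hk : k ∈ PySem.List.pyRange a limit 1 := List.mem_of_find?_eq_some hf
      rw [PySem.List.mem_pyRange_one] at hk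
      simp only [Option.getD_some]
      exact ⟨hk.1, le_of_lt hk.2⟩

theorem pvEnd_ge (data : List Int) (scan_values limit a : Int)
    (ha : a < limit) (hm : PySem.List.pyGet? data a = some scan_values) :
    pvEnd data scan_values limit a = pvEnd data scan_values limit (a + 1) := by
  unfold pvEnd
  rw [PySem.List.pyRange_one_cons ha, List.find?_cons_of_neg]
  simp [pvMismatch, hm]

-- A's first loop computes: stripe ++ the pixels of the matching run [i, E), index E, cnt E - i0,
-- where E = max i (first mismatch before limit), limit = min(min len max_i) (i0 + strip_max_len)
theorem pvALoop1_eq (data : List Int) (scan_values max_i strip_max_len i0 : Int) :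
    ∀ (fuel : Nat) (stripe : List Int) (i cnt : Int), cnt = i - i0 →
      (min (min ((data.length : Int)) max_i) (i0 + strip_max_len) - i).toNat ≤ fuel →
      pvALoop1 data scan_values max_i strip_max_len fuel stripe i cnt =
        (stripe ++ (PySem.List.pyRange i
            (max i (pvEnd data scan_values (min (min ((data.length : Int)) max_i) (i0 + strip_max_len)) i)) 1).map (pvPix data),
         max i (pvEnd data scan_values (min (min ((data.length : Int)) max_i) (i0 + strip_max_len)) i),
         max i (pvEnd data scan_values (min (min ((data.length : Int)) max_i) (i0 + strip_max_len)) i) - i0) := by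
  set limit := min (min ((data.length : Int)) max_i) (i0 + strip_max_len) with hlimit
  intro fuel
  induction fuel with
  | zero =>
      intro stripe i cnt hcnt hfuel
      have hle : limit ≤ i := by omega
      have he : pvEnd data scan_values limit i = limit := by
        unfold pvEnd; rw [PySem.List.pyRange_one_eq_nil hle]; simp
      rw [pvALoop1, he]
      have : max i limit = i := by omega
      rw [this, PySem.List.pyRange_one_eq_nil (le_refl i)]
      simp; omega
  | succ n ih =>
      intro stripe i cnt hcnt hfuel
      by_cases hlt : i < limit
      · obtain ⟨hge, hle⟩ := pvEnd_bounds data scan_values limit i (le_of_lt hlt)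
        by_cases hm : PySem.List.pyGet? data i = some scan_values
        · -- guard holds: one matching step
          have hg : i < (data.length : Int) ∧ PySem.List.pyGet? data i = some scan_values ∧
              cnt < strip_max_len ∧ i < max_i := ⟨by omega, hm, by omega, by omega⟩
          rw [pvALoop1, if_pos hg]
          have hstep := pvEnd_ge data scan_values limit i hlt hm
          obtain ⟨hge', hle'⟩ := pvEnd_bounds data scan_values limit (i+1) (by omega)
          have hE : max i (pvEnd data scan_values limit i) = pvEnd data scan_values limit (i+1) := by
            rw [hstep]; omega
          have hE' : max (i+1) (pvEnd data scan_values limit (i+1)) = pvEnd data scan_values limit (i+1) := by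
            omega
          rw [ih _ (i+1) (cnt+1) (by omega) (by omega), hE, hE']
          have hcons : PySem.List.pyRange i (pvEnd data scan_values limit (i+1)) 1 =
              i :: PySem.List.pyRange (i+1) (pvEnd data scan_values limit (i+1)) 1 :=
            PySem.List.pyRange_one_cons (by omega)
          rw [hcons]
          simp [pvPix, List.append_assoc]
        · -- mismatch at i: loop stops, E = i
          have hg : ¬ (i < (data.length : Int) ∧ PySem.List.pyGet? data i = some scan_values ∧
              cnt < strip_max_len ∧ i < max_i) := by
            intro h; exact hm h.2.1
          have he : pvEnd data scan_values limit i = i := by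
            unfold pvEnd
            rw [PySem.List.pyRange_one_cons hlt, List.find?_cons_of_pos]
            · simp
            · simp [pvMismatch, hm]
          rw [pvALoop1, if_neg hg, he]
          have : max i i = i := by omega
          rw [this, PySem.List.pyRange_one_eq_nil (le_refl i)]
          simp; omega
      · -- i past the limit: loop never runs
        have hg : ¬ (i < (data.length : Int) ∧ PySem.List.pyGet? data i = some scan_values ∧
            cnt < strip_max_len ∧ i < max_i) := by
          intro h; omega
        have he : pvEnd data scan_values limit i = limit := by
          unfold pvEnd; rw [PySem.List.pyRange_one_eq_nil (by omega)]; simp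
        rw [pvALoop1, if_neg hg, he]
        have : max i limit = i := by omega
        rw [this, PySem.List.pyRange_one_eq_nil (le_refl i)]
        simp; omega

-- ===== VERDICT (by name: the statement is the Claim_ definition above) =====
theorem pack_line_one_pixel_stop_spec : Claim_equal_pack_line_one_pixel_stop := by
  intro data i scan_values stop_values max_i strip_max_len _ hpre
  unfold Spec_pack_line_one_pixel_stop
  unfold pack_line_one_pixel_stop
  unfold Pre_pack_line_one_pixel_stop at hpre
  set limit := min (min ((data.length : Int)) max_i) (i + strip_max_len) with hlimit
  have halt : pack_line_one_pixel_stop_alt data i scan_values stop_values max_i strip_max_len =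
      ((PySem.List.pyRange i (max i (min (pvEnd data scan_values limit i + 1) limit)) 1).map (pvPix data),
       max i (min (pvEnd data scan_values limit i + 1) limit)) := rfl
  rw [halt]
  set e := pvEnd data scan_values limit i with he
  rw [pvALoop1_eq data scan_values max_i strip_max_len i _ [] i 0 (by omega) (by omega)]
  simp only [List.nil_append]
  set E := max i e with hE
  by_cases hlt : E < limit
  · -- stop pixel is taken: i < limit, E = e, j = e + 1
    have hi : i < limit := by omega
    obtain ⟨hge, hle⟩ := pvEnd_bounds data scan_values limit i (le_of_lt hi)
    have hEe : E = e := by omega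
    have hj : max i (min (e + 1) limit) = E + 1 := by omega
    have hfuel : ∃ m : Nat, ((data.length : Int) - E).toNat = m + 1 := by
      refine ⟨((data.length : Int) - E).toNat - 1, by omega⟩
    obtain ⟨m, hm⟩ := hfuel
    rw [hm, pvALoop2, if_pos (show E < (data.length : Int) ∧ E - i < strip_max_len ∧ E < max_i by
          refine ⟨by omega, by omega, by omega⟩),
        if_pos (show (0:Int) + 1 = 1 by norm_num), hj]
    rw [PySem.List.pyRange_one_succ_right (show i ≤ E by omega)]
    simp [pvPix]
  · -- no stop pixel: j = E
    have hj : max i (min (e + 1) limit) = E := by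
      by_cases hi : i < limit
      · obtain ⟨hge, hle⟩ := pvEnd_bounds data scan_values limit i (le_of_lt hi)
        omega
      · have : e = limit := by
          rw [he]; unfold pvEnd; rw [PySem.List.pyRange_one_eq_nil (by omega)]; simp
        omega
    have hg : ¬ (E < (data.length : Int) ∧ E - i < strip_max_len ∧ E < max_i) := by
      intro h; omega
    rw [hj]
    rcases Nat.eq_zero_or_eq_succ_pred ((data.length : Int) - E).toNat with h0 | hs
    · rw [h0, pvALoop2]
    · rw [hs, pvALoop2, if_neg hg]
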